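-- pv_equiv track=rewrite | github.com/moyashi0721/- | code/countPoint.py | arrangeTalkLIST
-- ===== SOURCE A (Python) =====
-- def arrangeTalkLIST(talkLIST, memberLIST):
--     '''把talkLIST以人為單位做整理'''
--     resultLIST = []
--     for i in range(len(memberLIST)):
--         resultLIST.append([])
--         for j in range(len(talkLIST)):
--             if talkLIST[j][1] == memberLIST[i]:
--                 resultLIST[i].append(talkLIST[j])
--     return resultLIST
-- ===== SOURCE B (Python) =====
-- def arrangeTalkLIST(talkLIST, memberLIST):
--     '''把talkLIST以人為單位做整理'''
--     groups = {}
--     for talk in talkLIST: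
--         groups.setdefault(talk[1], []).append(talk)
--     return [list(groups.get(member, [])) for member in memberLIST]
-- ===== Notes on version B (the rewrite author's own statement) =====
-- stated objective: alternative
-- what changed: Replaces the nested member-by-member scan of talkLIST with a single grouping pass that builds a dict keyed by talk[1], then emits each member's group by one lookup.
-- outside the precondition, e.g. on arrangeTalkLIST([['x']], []): A returns [], B raises IndexError
import Mathlib
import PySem

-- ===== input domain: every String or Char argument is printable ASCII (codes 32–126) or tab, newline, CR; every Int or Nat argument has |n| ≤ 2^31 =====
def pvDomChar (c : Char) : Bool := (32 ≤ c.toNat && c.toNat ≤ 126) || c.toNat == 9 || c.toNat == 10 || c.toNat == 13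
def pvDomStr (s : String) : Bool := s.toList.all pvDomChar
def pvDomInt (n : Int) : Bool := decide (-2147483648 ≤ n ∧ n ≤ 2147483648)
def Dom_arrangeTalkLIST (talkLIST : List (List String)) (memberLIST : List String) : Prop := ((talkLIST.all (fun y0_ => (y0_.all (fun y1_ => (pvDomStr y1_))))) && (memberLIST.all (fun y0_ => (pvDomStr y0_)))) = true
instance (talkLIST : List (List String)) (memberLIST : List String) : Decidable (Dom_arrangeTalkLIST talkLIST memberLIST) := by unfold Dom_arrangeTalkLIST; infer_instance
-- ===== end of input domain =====

-- B replaces A's nested member-by-member scans with one grouping pass over talkLIST (dict keyed by talk[1]) plus one lookup per member: a different traversal, same results.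

-- ===== PORT A =====
def arrangeTalkLIST (talkLIST : List (List String)) (memberLIST : List String) : List (List (List String)) :=
  (PySem.List.pyRange 0 memberLIST.length 1).foldl
    (fun resultLIST i =>
      resultLIST ++
        [(PySem.List.pyRange 0 talkLIST.length 1).foldl
          (fun row j =>
            if PySem.List.pyGetD (PySem.List.pyGetD talkLIST j []) 1 "" == PySem.List.pyGetD memberLIST i "" then
              row ++ [PySem.List.pyGetD talkLIST j []]
            else row) []]) []

-- ===== PORT B =====
def arrangeTalkLIST_alt (talkLIST : List (List String)) (memberLIST : List String) : List (List (List String)) :=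
  let groups : PySem.Dict String (List (List String)) :=
    talkLIST.foldl (fun d talk => d.modify (PySem.List.pyGetD talk 1 "") [] (fun g => g ++ [talk])) PySem.Dict.empty
  memberLIST.map (fun member => groups.getD member [])

-- ===== PRECONDITION & SPEC =====
-- Pre_ excludes talk records with fewer than 2 fields: on those A raises IndexError whenever
-- memberLIST is nonempty, and when memberLIST is empty A returns [] without ever reading the
-- records while B's grouping pass reads talk[1] and raises.
def Pre_arrangeTalkLIST (talkLIST : List (List String)) (memberLIST : List String) : Prop :=
  ∀ t ∈ talkLIST, 2 ≤ t.length
instance (talkLIST : List (List String)) (memberLIST : List String) : Decidable (Pre_arrangeTalkLIST talkLIST memberLIST) := by unfold Pre_arrangeTalkLIST; infer_instance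

def pvWitness_arrangeTalkLIST : List (List String) × List String := ([["t1", "alice"], ["t2", "bob"]], ["bob", "alice"])

def Spec_arrangeTalkLIST (talkLIST : List (List String)) (memberLIST : List String) (out : List (List (List String))) : Prop := out = arrangeTalkLIST_alt talkLIST memberLIST
instance (talkLIST : List (List String)) (memberLIST : List String) (out : List (List (List String))) : Decidable (Spec_arrangeTalkLIST talkLIST memberLIST out) := by unfold Spec_arrangeTalkLIST; infer_instance

-- ===== CLAIM (what is proved, stated in full; the proofs are below) =====
def Claim_equal_arrangeTalkLIST : Prop := ∀ (talkLIST : List (List String)) (memberLIST : List String), Dom_arrangeTalkLIST talkLIST memberLIST → Pre_arrangeTalkLIST talkLIST memberLIST → Spec_arrangeTalkLIST talkLIST memberLIST (arrangeTalkLIST talkLIST memberLIST)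

-- ===== LEMMAS AND PROOFS =====

-- A's row for member m is the filter of talkLIST on key = m.
theorem arrangeTalkLIST_eq_map_filter (talkLIST : List (List String)) (memberLIST : List String) :
    arrangeTalkLIST talkLIST memberLIST =
      memberLIST.map (fun m => talkLIST.filter (fun t => PySem.List.pyGetD t 1 "" == m)) := by
  unfold arrangeTalkLIST
  rw [PySem.List.foldl_pyRange_zero_pyGetD' (xs := memberLIST) (d := "")
    (f := fun resultLIST m =>
      resultLIST ++
        [(PySem.List.pyRange 0 talkLIST.length 1).foldl
          (fun row j =>
            if PySem.List.pyGetD (PySem.List.pyGetD talkLIST j []) 1 "" == m then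
              row ++ [PySem.List.pyGetD talkLIST j []]
            else row) []])]
  rw [PySem.List.foldl_append_singleton_eq_map]
  simp only [List.nil_append]
  apply List.map_congr_left
  intro m _
  rw [PySem.List.foldl_pyRange_zero_pyGetD' (xs := talkLIST) (d := ([] : List String))
    (f := fun row t => if PySem.List.pyGetD t 1 "" == m then row ++ [t] else row)]
  rw [PySem.List.foldl_append_if_eq_filter]
  simp

-- The grouping dict's lookup at m is the filter of the processed talks on key = m.
theorem groups_getD (m : String) :
    ∀ (tl : List (List String)) (d : PySem.Dict String (List (List String))),
      (tl.foldl (fun d talk => d.modify (PySem.List.pyGetD talk 1 "") [] (fun g => g ++ [talk])) d).getD m [] =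
        d.getD m [] ++ tl.filter (fun t => PySem.List.pyGetD t 1 "" == m) := by
  intro tl
  induction tl with
  | nil => intro d; simp
  | cons t tl ih =>
    intro d
    simp only [List.foldl_cons, ih, List.filter_cons]
    by_cases h : PySem.List.pyGetD t 1 "" = m
    · subst h
      rw [PySem.Dict.getD_modify_self]
      simp
    · rw [PySem.Dict.getD_modify_of_ne]
      · simp [h]
      · exact fun hc => h hc.symm

theorem arrangeTalkLIST_alt_eq_map_filter (talkLIST : List (List String)) (memberLIST : List String) :
    arrangeTalkLIST_alt talkLIST memberLIST =
      memberLIST.map (fun m => talkLIST.filter (fun t => PySem.List.pyGetD t 1 "" == m)) := by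
  unfold arrangeTalkLIST_alt
  apply List.map_congr_left
  intro m _
  rw [groups_getD]
  simp

-- ===== VERDICT (by name: the statement is the Claim_ definition above) =====
theorem arrangeTalkLIST_spec : Claim_equal_arrangeTalkLIST := by
  intro talkLIST memberLIST _ _
  unfold Spec_arrangeTalkLIST
  rw [arrangeTalkLIST_eq_map_filter, arrangeTalkLIST_alt_eq_map_filter]
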